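-- pv_equiv track=rewrite | github.com/cheeze2000/aoc | 2025/03/03a.py | joltage
-- ===== SOURCE A (Python) =====
-- def joltage(nums):
-- 	i = 0
-- 	j = 0
--
-- 	highest = 0
--
-- 	while j < len(nums):
-- 		if i == j:
-- 			j += 1
-- 			continue
--
-- 		highest = max(highest, nums[i] * 10 + nums[j])
--
-- 		if nums[i] < nums[j]:
-- 			i = j
-- 			j += 1
-- 		else:
-- 			j += 1
--
-- 	return highest
-- ===== SOURCE B (Python) =====
-- def joltage(nums):
--     if len(nums) < 2:
--         return 0
--     pmax = []
--     m = nums[0]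
--     for x in nums:
--         m = m if m >= x else x
--         pmax.append(m)
--     best = 0
--     for j in range(1, len(nums)):
--         v = pmax[j - 1] * 10 + nums[j]
--         if v > best:
--             best = v
--     return best
-- ===== Notes on version B (the rewrite author's own statement) =====
-- stated objective: simpler
-- what changed: Replaces A's two-index (i,j) state machine with a two-phase decomposition: build the prefix-maximum table in one pass, then a separate pass over j>=1 maximizing pmax[j-1]*10 + nums[j] floored at 0.
import Mathlib
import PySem

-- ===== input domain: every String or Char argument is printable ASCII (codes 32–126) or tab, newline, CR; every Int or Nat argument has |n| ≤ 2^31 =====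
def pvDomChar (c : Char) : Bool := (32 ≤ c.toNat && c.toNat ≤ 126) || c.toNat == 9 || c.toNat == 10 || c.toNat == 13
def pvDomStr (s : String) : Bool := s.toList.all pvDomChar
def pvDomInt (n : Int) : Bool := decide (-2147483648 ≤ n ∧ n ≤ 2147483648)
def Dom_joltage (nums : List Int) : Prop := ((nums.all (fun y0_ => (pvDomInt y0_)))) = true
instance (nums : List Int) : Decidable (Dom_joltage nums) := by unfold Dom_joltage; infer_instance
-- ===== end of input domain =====

-- B replaces A's two-index (i,j) state machine by a prefix-maximum table built in one
-- pass followed by a separate combining pass; objective: simpler decomposition.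

-- ===== PORT A =====
-- A's while loop; i and j are Python ints that stay in [0, len(nums)], so they are
-- carried as Nat and nums[i] (always in range here) is nums.getD i 0.
def joltageLoopA (nums : List Int) (i j : Nat) (highest : Int) : Int :=
  if j < nums.length then
    if i == j then joltageLoopA nums i (j + 1) highest
    else
      let highest' := max highest (nums.getD i 0 * 10 + nums.getD j 0)
      if nums.getD i 0 < nums.getD j 0 then joltageLoopA nums j (j + 1) highest'
      else joltageLoopA nums i (j + 1) highest'
  else highest
termination_by nums.length - j

def joltage (nums : List Int) : Int := joltageLoopA nums 0 0 0

-- ===== PORT B =====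
-- first pass of Source B: m = m if m >= x else x; pmax.append(m)
def pmaxLoop : List Int → Int → List Int
  | [], _ => []
  | x :: xs, m =>
      let m' := if m ≥ x then m else x
      m' :: pmaxLoop xs m'

-- second pass of Source B: for j in range(1, len(nums)), keep best if v > best
def bestLoop (nums pmax : List Int) (j : Nat) (best : Int) : Int :=
  if j < nums.length then
    let v := pmax.getD (j - 1) 0 * 10 + nums.getD j 0
    bestLoop nums pmax (j + 1) (if v > best then v else best)
  else best
termination_by nums.length - j

def joltage_alt (nums : List Int) : Int :=
  if nums.length < 2 then 0
  else
    let pmax := pmaxLoop nums (nums.headD 0)   -- m starts as nums[0]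
    bestLoop nums pmax 1 0

-- ===== PRECONDITION & SPEC =====
def Spec_joltage (nums : List Int) (out : Int) : Prop := out = joltage_alt nums
instance (nums : List Int) (out : Int) : Decidable (Spec_joltage nums out) := by unfold Spec_joltage; infer_instance

-- ===== CLAIM (what is proved, stated in full; the proofs are below) =====
def Claim_equal_joltage : Prop := ∀ (nums : List Int), Dom_joltage nums → Spec_joltage nums (joltage nums)

-- ===== LEMMAS AND PROOFS =====

lemma pmaxLoop_getD (xs : List Int) (m : Int) (j : Nat) (hj : j < xs.length) :
    (pmaxLoop xs m).getD j 0 =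
      max (xs.getD j 0) (if j = 0 then m else (pmaxLoop xs m).getD (j - 1) 0) := by
  induction xs generalizing m j with
  | nil => simp at hj
  | cons x xs ih =>
    cases j with
    | zero =>
      simp only [pmaxLoop, List.getD_cons_zero]
      rw [if_pos trivial, max_def]
    | succ k =>
      simp only [pmaxLoop, List.getD_cons_succ]
      have hk : k < xs.length := by simpa using Nat.lt_of_succ_lt_succ hj
      rw [ih _ k hk]
      have : (Nat.succ k) - 1 = k := rfl
      rw [this]
      congr 1
      cases k with
      | zero => simp
      | succ l => simp

-- main invariant: while i < j and nums[i] equals the prefix maximum pmax[j-1],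
-- A's loop from (i, j, h) computes B's second pass from (j, h)
lemma loop_eq (nums : List Int) (j i : Nat) (h : Int)
    (hj1 : 1 ≤ j) (hij : i < j) (hjn : j ≤ nums.length)
    (hinv : nums.getD i 0 = (pmaxLoop nums (nums.headD 0)).getD (j - 1) 0) :
    joltageLoopA nums i j h = bestLoop nums (pmaxLoop nums (nums.headD 0)) j h := by
  set pmax := pmaxLoop nums (nums.headD 0) with hpm
  generalize hk : nums.length - j = k
  induction k generalizing i j h with
  | zero =>
    have : ¬ j < nums.length := by omega
    rw [joltageLoopA, bestLoop]
    simp [this]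
  | succ k ih =>
    have hjlt : j < nums.length := by omega
    have hij' : ¬ (i == j) = true := by simp; omega
    rw [joltageLoopA, bestLoop]
    simp only [if_pos hjlt, hij', Bool.false_eq_true, if_false]
    have hmax : (if pmax.getD (j - 1) 0 * 10 + nums.getD j 0 > h then
        pmax.getD (j - 1) 0 * 10 + nums.getD j 0 else h)
        = max h (nums.getD i 0 * 10 + nums.getD j 0) := by
      rw [hinv]
      rcases le_total (pmax.getD (j - 1) 0 * 10 + nums.getD j 0) h with hc | hc
      · rw [if_neg (by omega), max_eq_left hc]
      · rw [max_eq_right hc]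
        by_cases hd : pmax.getD (j - 1) 0 * 10 + nums.getD j 0 > h
        · rw [if_pos hd]
        · rw [if_neg hd]; omega
    rw [hmax]
    have hrec : pmax.getD j 0 = max (nums.getD j 0) (pmax.getD (j - 1) 0) := by
      rw [hpm, pmaxLoop_getD nums (nums.headD 0) j hjlt, if_neg (by omega)]
    have hj0 : (j + 1) - 1 = j := rfl
    split
    · -- nums[i] < nums[j] : i becomes j
      refine ih (j + 1) j _ (by omega) (by omega) (by omega) ?_ (by omega)
      rw [hj0, hrec, ← hinv, max_eq_left (le_of_lt (by assumption))]
    · -- nums[i] >= nums[j] : i stays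
      refine ih (j + 1) i _ (by omega) (by omega) (by omega) ?_ (by omega)
      rw [hj0, hrec, ← hinv, max_eq_right (by omega)]

-- ===== VERDICT (by name: the statement is the Claim_ definition above) =====
theorem joltage_spec : Claim_equal_joltage := by
  intro nums _
  unfold Spec_joltage joltage joltage_alt
  match nums with
  | [] => rw [joltageLoopA]; simp
  | [a] =>
    rw [joltageLoopA]
    simp only [List.length_singleton, if_pos Nat.zero_lt_one, beq_self_eq_true, if_true]
    rw [joltageLoopA]; simp
  | a :: b :: rest =>
    have hlen : ¬ (a :: b :: rest).length < 2 := by simp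
    rw [if_neg hlen]
    rw [joltageLoopA]
    have h0 : (0 : Nat) < (a :: b :: rest).length := by simp
    simp only [if_pos h0, beq_self_eq_true, if_true]
    refine loop_eq (a :: b :: rest) 1 0 0 le_rfl Nat.zero_lt_one (by simp) ?_
    simp [pmaxLoop]
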